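-- pv_equiv track=rewrite | github.com/JGMEYER/chess-practice | graphics/move_list_renderer.py | _pair_moves
-- ===== SOURCE A (Python) =====
-- def _pair_moves(
--     moves: list[str]
-- ) -> list[tuple[int, str, str | None]]:
--     """
--     Group moves into (move_number, white_move, black_move) tuples.
--
--     Args:
--         moves: List of SAN moves
--
--     Returns:
--         List of tuples (move_num, white_move, black_move or None)
--     """
--     pairs = []
--     for i in range(0, len(moves), 2):
--         move_num = i // 2 + 1
--         white_move = moves[i]
--         black_move = moves[i + 1] if i + 1 < len(moves) else None
--         pairs.append((move_num, white_move, black_move))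
--     return pairs
-- ===== SOURCE B (Python) =====
-- def _pair_moves(moves):
--     """Split-then-zip: strided slices for white/black, padded, zipped with numbering."""
--     whites = moves[0::2]
--     blacks = moves[1::2]
--     padded = blacks + [None] * (len(whites) - len(blacks))
--     return [(i, w, b) for i, (w, b) in enumerate(zip(whites, padded), start=1)]
-- ===== Notes on version B (the rewrite author's own statement) =====
-- stated objective: alternative
-- what changed: Replaces the index-stepping loop (range(0,len,2) with i//2+1 and an i+1<len bound check) by a split-then-zip decomposition: two strided slices whites/blacks, blacks padded with None, zipped and numbered by enumerate.
import Mathlib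
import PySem

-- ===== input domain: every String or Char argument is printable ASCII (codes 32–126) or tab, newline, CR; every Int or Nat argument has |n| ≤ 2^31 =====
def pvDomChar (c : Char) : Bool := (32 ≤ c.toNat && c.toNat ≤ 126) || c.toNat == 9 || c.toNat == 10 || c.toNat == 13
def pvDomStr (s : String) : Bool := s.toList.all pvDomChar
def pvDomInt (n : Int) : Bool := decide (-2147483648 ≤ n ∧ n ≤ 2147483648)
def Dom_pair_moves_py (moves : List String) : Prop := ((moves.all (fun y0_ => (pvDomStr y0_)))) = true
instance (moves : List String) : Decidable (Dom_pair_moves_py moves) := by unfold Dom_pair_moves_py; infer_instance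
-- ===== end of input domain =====

-- B replaces A's index-stepping loop by a split-then-zip decomposition (strided slices, padding, enumerate); same cost, different shape.

-- ===== PORT A =====
def pair_moves_py (moves : List String) : List (Int × String × Option String) :=
  (PySem.List.pyRange 0 (moves.length) 2).foldl
    (fun pairs i =>
      let move_num : Int := PySem.Int.floordiv i 2 + 1
      let white_move : String := PySem.List.pyGetD moves i ""
      let black_move : Option String :=
        if i + 1 < (moves.length : Int) then some (PySem.List.pyGetD moves (i + 1) "") else none
      pairs ++ [(move_num, white_move, black_move)]) []

-- ===== PORT B =====
def pair_moves_py_alt (moves : List String) : List (Int × String × Option String) :=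
  let whites := (PySem.List.slice? moves (some 0) none 2).getD []
  let blacks := (PySem.List.slice? moves (some 1) none 2).getD []
  let padded := blacks.map some ++ List.replicate (whites.length - blacks.length) none
  (PySem.List.enumerate (whites.zip padded) 1).map (fun p => (p.1, p.2.1, p.2.2))

-- ===== PRECONDITION & SPEC =====
def Spec_pair_moves_py (moves : List String) (out : List (Int × String × Option String)) : Prop := out = pair_moves_py_alt moves
instance (moves : List String) (out : List (Int × String × Option String)) : Decidable (Spec_pair_moves_py moves out) := by unfold Spec_pair_moves_py; infer_instance

-- ===== CLAIM (what is proved, stated in full; the proofs are below) =====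
def Claim_equal_pair_moves_py : Prop := ∀ (moves : List String), Dom_pair_moves_py moves → Spec_pair_moves_py moves (pair_moves_py moves)

-- ===== LEMMAS AND PROOFS =====

-- A's loop, normalised: the k-th pair reads moves[2k] and (maybe) moves[2k+1].
theorem pair_moves_py_eq_map (moves : List String) :
    pair_moves_py moves =
      (List.range ((moves.length + 1) / 2)).map
        (fun (k : Nat) => ((k : Int) + 1, moves.getD (2 * k) "",
          if 2 * k + 1 < moves.length then some (moves.getD (2 * k + 1) "") else none)) := by
  unfold pair_moves_py
  rw [PySem.List.foldl_append_singleton_eq_map, List.nil_append,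
    PySem.List.pyRange_of_pos 0 (moves.length) (by norm_num), List.map_map]
  have hcnt : (if (0:Int) < moves.length then (((moves.length:Int) - 0 + 2 - 1) / 2).toNat else 0)
      = (moves.length + 1) / 2 := by split <;> omega
  rw [hcnt]
  apply List.map_congr_left
  intro k hk
  simp only [Function.comp]
  have h1 : (0:Int) + 2 * (k:Int) = ((2*k : Nat) : Int) := by push_cast; ring
  rw [h1]
  rw [show ((2*k : Nat) : Int) + 1 = ((2*k+1 : Nat) : Int) from by push_cast; ring]
  rw [PySem.List.pyGetD_natCast, PySem.List.pyGetD_natCast]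
  have hfd : PySem.Int.floordiv ((2*k : Nat) : Int) 2 + 1 = (k : Int) + 1 := by
    rw [PySem.Int.floordiv_eq_ediv_of_pos (by norm_num : (0:Int) < 2)]
    omega
  rw [hfd]
  have hiff : (((2*k+1 : Nat) : Int) < (moves.length : Int)) ↔ (2 * k + 1 < moves.length) := by
    exact_mod_cast Iff.rfl
  simp only [hiff]

-- The even-index slice moves[0::2].
theorem whites_eq (moves : List String) :
    (PySem.List.slice? moves (some 0) none 2).getD [] =
      (List.range ((moves.length + 1) / 2)).map (fun k => moves.getD (2 * k) "") := by
  unfold PySem.List.slice? PySem.List.sliceIndices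
  norm_num
  have hcnt : (if 0 < moves.length then (((moves.length:Int) + 2 - 1) / 2).toNat else 0)
      = (moves.length + 1) / 2 := by split <;> omega
  rw [hcnt, ← List.filterMap_eq_map]
  apply List.filterMap_congr
  intro k hk
  have hk' : k < (moves.length + 1) / 2 := List.mem_range.mp hk
  have h2k : 2 * k < moves.length := by omega
  have ht : (2 * (k:Int)).toNat = 2 * k := by omega
  simp [ht, List.getElem?_eq_getElem h2k]

-- The odd-index slice moves[1::2].
theorem blacks_eq (moves : List String) :
    (PySem.List.slice? moves (some 1) none 2).getD [] =
      (List.range (moves.length / 2)).map (fun k => moves.getD (2 * k + 1) "") := by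
  unfold PySem.List.slice? PySem.List.sliceIndices
  norm_num
  have hcnt : (if 1 < moves.length then (((moves.length:Int) - min 1 (moves.length:Int) + 2 - 1) / 2).toNat else 0)
      = moves.length / 2 := by split <;> omega
  rw [hcnt, ← List.filterMap_eq_map]
  apply List.filterMap_congr
  intro k hk
  have hk' : k < moves.length / 2 := List.mem_range.mp hk
  have h2k : 2 * k + 1 < moves.length := by omega
  have ht : (min 1 (moves.length:Int) + 2 * (k:Int)).toNat = 2 * k + 1 := by omega
  simp [ht, List.getElem?_eq_getElem h2k]

-- enumerate over a map of range is a map of range.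
theorem enumerate_map_range {α : Type} (q : Nat → α) (m : Nat) (s : Int) :
    PySem.List.enumerate ((List.range m).map q) s =
      (List.range m).map (fun (k : Nat) => (s + (k : Int), q k)) := by
  induction m generalizing s with
  | zero => simp [PySem.List.enumerate_nil]
  | succ m ih =>
    rw [List.range_succ, List.map_append, PySem.List.enumerate_append, ih, List.map_append]
    simp [PySem.List.enumerate_cons]

-- B, normalised to the same map over range.
theorem pair_moves_py_alt_eq_map (moves : List String) :
    pair_moves_py_alt moves =
      (List.range ((moves.length + 1) / 2)).map
        (fun (k : Nat) => ((k : Int) + 1, moves.getD (2 * k) "",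
          if 2 * k + 1 < moves.length then some (moves.getD (2 * k + 1) "") else none)) := by
  unfold pair_moves_py_alt
  rw [whites_eq, blacks_eq]
  simp only [List.length_map, List.length_range, List.map_map]
  have hpad : ((List.range (moves.length / 2)).map ((fun b => some b) ∘ (fun k => moves.getD (2*k+1) ""))
        ++ List.replicate ((moves.length + 1) / 2 - moves.length / 2) none)
      = (List.range ((moves.length + 1) / 2)).map
          (fun (k : Nat) => if 2 * k + 1 < moves.length then some (moves.getD (2 * k + 1) "") else none) := by
    conv_rhs => rw [show (moves.length + 1) / 2 = moves.length / 2 + ((moves.length + 1) / 2 - moves.length / 2) from by omega]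
    rw [List.range_add, List.map_append, List.map_map]
    congr 1
    · apply List.map_congr_left
      intro k hk
      have : 2 * k + 1 < moves.length := by have := List.mem_range.mp hk; omega
      simp [this]
    · have : ∀ x ∈ List.range ((moves.length + 1) / 2 - moves.length / 2),
          ((fun (k : Nat) => if 2 * k + 1 < moves.length then some (moves.getD (2 * k + 1) "") else none) ∘
            (fun y => moves.length / 2 + y)) x = (none : Option String) := by
        intro x hx
        have : ¬ (2 * (moves.length / 2 + x) + 1 < moves.length) := by omega
        simp [this]
      rw [List.map_congr_left this]
      simp
  rw [hpad, List.zip_map', enumerate_map_range, List.map_map]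
  apply List.map_congr_left
  intro k hk
  simp [add_comm]

-- ===== VERDICT (by name: the statement is the Claim_ definition above) =====
theorem pair_moves_py_spec : Claim_equal_pair_moves_py := by
  intro moves _
  unfold Spec_pair_moves_py
  rw [pair_moves_py_eq_map, pair_moves_py_alt_eq_map]
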